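-- pv_equiv track=rewrite | github.com/andreiapostol/JavaDeobfuscation | create_gnn_structure.py | get_nodelabels_and_newedges
-- ===== SOURCE A (Python) =====
-- def get_nodelabels_and_newedges(types_deps, edge_name_to_index_mapping):
--     new_edges = []
--     node_labels = []
--     for type_dep in types_deps:
--         current_deps = type_dep["dependencies"]
--         seen_name_dict = dict()
--         for (start, end, edge_type) in current_deps:
--             if start not in seen_name_dict:
--                 seen_name_dict[start] = len(node_labels)
--                 node_labels.append(start)
--             if end not in seen_name_dict:
--                 seen_name_dict[end] = len(node_labels)
--                 node_labels.append(end)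
--             new_edges.append((seen_name_dict[start], seen_name_dict[end], \
--                 edge_name_to_index_mapping[edge_type]))
--     return node_labels, new_edges
-- ===== SOURCE B (Python) =====
-- def get_nodelabels_and_newedges(types_deps, edge_name_to_index_mapping):
--     # Stage 1: compute each type_dep block independently, with ZERO-BASED local indices.
--     blocks = []
--     for type_dep in types_deps:
--         deps = type_dep["dependencies"]
--         local = list(dict.fromkeys(n for d in deps for n in (d[0], d[1])))
--         idx = {n: i for i, n in enumerate(local)}
--         blocks.append((local, [(idx[s], idx[e], edge_name_to_index_mapping[t])
--                                for s, e, t in deps]))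
--     # Stage 2: concatenate blocks, shifting each block's endpoints by the running offset.
--     node_labels, new_edges, off = [], [], 0
--     for local, edges in blocks:
--         node_labels += local
--         new_edges += [(a + off, b + off, c) for a, b, c in edges]
--         off += len(local)
--     return node_labels, new_edges
-- ===== Notes on version B (the rewrite author's own statement) =====
-- stated objective: alternative
-- what changed: B computes every type_dep block independently with zero-based local indices (ordered dedup of the block's names, an enumerate-built index dict, local edge triples), then concatenates the blocks in a second stage that shifts each block's edge endpoints by the running label-count offset; A instead threads one global label list and counter through a single interleaved loop.
import Mathlib
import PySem

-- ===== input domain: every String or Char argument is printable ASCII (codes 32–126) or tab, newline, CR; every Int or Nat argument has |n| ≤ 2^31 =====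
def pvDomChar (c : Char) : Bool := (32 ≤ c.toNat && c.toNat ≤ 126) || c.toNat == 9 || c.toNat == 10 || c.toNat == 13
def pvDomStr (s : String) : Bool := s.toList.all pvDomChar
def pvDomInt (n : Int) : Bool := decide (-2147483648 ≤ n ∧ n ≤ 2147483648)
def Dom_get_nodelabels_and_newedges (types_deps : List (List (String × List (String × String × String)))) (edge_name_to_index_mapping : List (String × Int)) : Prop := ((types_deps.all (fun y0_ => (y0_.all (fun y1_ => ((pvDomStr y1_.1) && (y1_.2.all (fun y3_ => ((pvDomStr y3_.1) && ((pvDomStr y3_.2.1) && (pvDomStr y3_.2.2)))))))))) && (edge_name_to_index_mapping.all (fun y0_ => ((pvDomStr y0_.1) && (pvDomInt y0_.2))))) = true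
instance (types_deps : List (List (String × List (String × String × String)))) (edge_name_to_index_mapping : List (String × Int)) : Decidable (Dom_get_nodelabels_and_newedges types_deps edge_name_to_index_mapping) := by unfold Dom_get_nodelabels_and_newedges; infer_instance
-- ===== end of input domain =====

-- B computes each type_dep block independently with zero-based local indices and then
-- concatenates the blocks, shifting edge endpoints by the running label-count offset;
-- A threads one global label list through an interleaved loop. Alternative decomposition, same cost.


-- ===== PORT A =====
-- A's inner loop body: conditionally add start, then end, then append one edge.
-- seen_name_dict[start] / [end] always succeed in Python (just inserted), so getD 0 is exact;
-- edge_name_to_index_mapping[edge_type] raises KeyError when absent — excluded by Pre_ below.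
def aInner (m : PySem.Dict String Int)
    (st : PySem.Dict String Int × List String × List (Int × Int × Int))
    (dep : String × String × String) :
    PySem.Dict String Int × List String × List (Int × Int × Int) :=
  let p1 := if st.1.contains dep.1 then (st.1, st.2.1)
            else (st.1.insert dep.1 ((st.2.1.length : Int)), st.2.1 ++ [dep.1])
  let p2 := if p1.1.contains dep.2.1 then p1
            else (p1.1.insert dep.2.1 ((p1.2.length : Int)), p1.2 ++ [dep.2.1])
  (p2.1, p2.2, st.2.2 ++ [(p2.1.getD dep.1 0, p2.1.getD dep.2.1 0, m.getD dep.2.2 0)])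

-- one iteration of A's outer loop over types_deps
def aStep (m : PySem.Dict String Int) (st : List String × List (Int × Int × Int))
    (td : List (String × List (String × String × String))) :
    List String × List (Int × Int × Int) :=
  let deps := ((PySem.Dict.ofList td).get? "dependencies").getD []   -- td["dependencies"]; KeyError excluded by Pre_
  let r := deps.foldl (aInner m) (PySem.Dict.empty, st.1, st.2)
  (r.2.1, r.2.2)

def get_nodelabels_and_newedges (types_deps : List (List (String × List (String × String × String)))) (edge_name_to_index_mapping : List (String × Int)) : List String × (List (Int × Int × Int)) :=
  types_deps.foldl (aStep (PySem.Dict.ofList edge_name_to_index_mapping)) ([], [])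

-- ===== PORT B =====
-- local = list(dict.fromkeys(names of the block, start before end)): PySem.List.dedup
def localLabels (deps : List (String × String × String)) : List String :=
  PySem.List.dedup (deps.flatMap (fun dep => [dep.1, dep.2.1]))

-- one block: (local labels, zero-based local edges)  —  idx = {n: i for i, n in enumerate(local)}
def localBlock (m : PySem.Dict String Int) (td : List (String × List (String × String × String))) :
    List String × List (Int × Int × Int) :=
  let deps := ((PySem.Dict.ofList td).get? "dependencies").getD []   -- td["dependencies"]; KeyError excluded by Pre_
  let loc := localLabels deps
  let idx := PySem.Dict.ofList ((PySem.List.enumerate loc).map (fun p => (p.2, p.1)))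
  (loc, deps.map (fun dep => (idx.getD dep.1 0, idx.getD dep.2.1 0, m.getD dep.2.2 0)))

-- stage 2 step: append labels, append edges shifted by the running offset, bump the offset
def combineB (st : List String × List (Int × Int × Int) × Int)
    (blk : List String × List (Int × Int × Int)) :
    List String × List (Int × Int × Int) × Int :=
  (st.1 ++ blk.1,
   st.2.1 ++ blk.2.map (fun e => (e.1 + st.2.2, e.2.1 + st.2.2, e.2.2)),
   st.2.2 + (blk.1.length : Int))

def get_nodelabels_and_newedges_alt (types_deps : List (List (String × List (String × String × String)))) (edge_name_to_index_mapping : List (String × Int)) : List String × (List (Int × Int × Int)) :=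
  let m := PySem.Dict.ofList edge_name_to_index_mapping
  let blocks := types_deps.map (localBlock m)
  let r := blocks.foldl combineB ([], [], 0)
  (r.1, r.2.1)

-- ===== PRECONDITION & SPEC =====
-- Pre_ excludes exactly the inputs on which Python A raises KeyError: a type_dep without a
-- "dependencies" key, or a dependency whose edge_type is not a key of edge_name_to_index_mapping.
def Pre_get_nodelabels_and_newedges (types_deps : List (List (String × List (String × String × String)))) (edge_name_to_index_mapping : List (String × Int)) : Prop :=
  ∀ td ∈ types_deps,
    (PySem.Dict.ofList td).contains "dependencies" = true ∧
    ∀ dep ∈ ((PySem.Dict.ofList td).get? "dependencies").getD [],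
      (PySem.Dict.ofList edge_name_to_index_mapping).contains dep.2.2 = true
instance (types_deps : List (List (String × List (String × String × String)))) (edge_name_to_index_mapping : List (String × Int)) : Decidable (Pre_get_nodelabels_and_newedges types_deps edge_name_to_index_mapping) := by unfold Pre_get_nodelabels_and_newedges; infer_instance
def pvWitness_get_nodelabels_and_newedges : (List (List (String × List (String × String × String)))) × (List (String × Int)) :=
  ([[("dependencies", [("a", "b", "x"), ("b", "a", "x")])], [("dependencies", [("a", "c", "y")])]], [("x", 3), ("y", 5)])
def Spec_get_nodelabels_and_newedges (types_deps : List (List (String × List (String × String × String)))) (edge_name_to_index_mapping : List (String × Int)) (out : List String × (List (Int × Int × Int))) : Prop := out = get_nodelabels_and_newedges_alt types_deps edge_name_to_index_mapping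
instance (types_deps : List (List (String × List (String × String × String)))) (edge_name_to_index_mapping : List (String × Int)) (out : List String × (List (Int × Int × Int))) : Decidable (Spec_get_nodelabels_and_newedges types_deps edge_name_to_index_mapping out) := by unfold Spec_get_nodelabels_and_newedges; infer_instance

-- ===== CLAIM (what is proved, stated in full; the proofs are below) =====
def Claim_equal_get_nodelabels_and_newedges : Prop := ∀ (types_deps : List (List (String × List (String × String × String)))) (edge_name_to_index_mapping : List (String × Int)), Dom_get_nodelabels_and_newedges types_deps edge_name_to_index_mapping → Pre_get_nodelabels_and_newedges types_deps edge_name_to_index_mapping → Spec_get_nodelabels_and_newedges types_deps edge_name_to_index_mapping (get_nodelabels_and_newedges types_deps edge_name_to_index_mapping)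

-- ===== LEMMAS AND PROOFS =====

-- Proof-side bridge: the per-type_dep state of A's interleaved loop, split into
-- "register a name" (addName / pass1) and the zero-based index dict mkIdx.

def addName (st : PySem.Dict String Int × List String) (n : String) :
    PySem.Dict String Int × List String :=
  if st.1.contains n then st else (st.1.insert n ((st.2.length : Int)), st.2 ++ [n])

def pass1 (st : PySem.Dict String Int × List String) (dep : String × String × String) :
    PySem.Dict String Int × List String :=
  addName (addName st dep.1) dep.2.1

-- the dict {n ↦ (position of n in loc) + b}
def mkIdx (loc : List String) (b : Int) : PySem.Dict String Int :=
  PySem.Dict.ofList ((PySem.List.enumerate loc).map (fun p => (p.2, p.1 + b)))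

lemma addName_get?_self (st : PySem.Dict String Int × List String) (n : String) :
    ∃ v, (addName st n).1.get? n = some v := by
  unfold addName
  split
  · rename_i h
    rw [PySem.Dict.contains_eq_isSome_get?, Option.isSome_iff_exists] at h
    exact h
  · exact ⟨_, PySem.Dict.get?_insert_self _ _ _⟩

lemma addName_mono (st : PySem.Dict String Int × List String) (n k : String) (v : Int)
    (h : st.1.get? k = some v) : (addName st n).1.get? k = some v := by
  unfold addName
  split
  · exact h
  · rename_i hc
    by_cases hk : k = n
    · subst hk
      rw [PySem.Dict.contains_eq_isSome_get?, h] at hc; simp at hc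
    · simp [PySem.Dict.get?_insert, hk, h]

lemma pass1_mono (st : PySem.Dict String Int × List String) (dep : String × String × String)
    (k : String) (v : Int) (h : st.1.get? k = some v) :
    (pass1 st dep).1.get? k = some v :=
  addName_mono _ _ _ _ (addName_mono _ _ _ _ h)

lemma foldl_pass1_mono (deps : List (String × String × String)) :
    ∀ (st : PySem.Dict String Int × List String) (k : String) (v : Int),
      st.1.get? k = some v → (deps.foldl pass1 st).1.get? k = some v := by
  induction deps with
  | nil => intro st k v h; exact h
  | cons dep deps ih =>
    intro st k v h
    exact ih _ _ _ (pass1_mono _ _ _ _ h)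

lemma pass1_get?_fst (st : PySem.Dict String Int × List String) (dep : String × String × String) :
    ∃ v, (pass1 st dep).1.get? dep.1 = some v := by
  obtain ⟨v, hv⟩ := addName_get?_self st dep.1
  exact ⟨v, addName_mono _ _ _ _ hv⟩

lemma pass1_get?_snd (st : PySem.Dict String Int × List String) (dep : String × String × String) :
    ∃ v, (pass1 st dep).1.get? dep.2.1 = some v :=
  addName_get?_self _ _

lemma aInner_eq (m : PySem.Dict String Int)
    (st : PySem.Dict String Int × List String × List (Int × Int × Int))
    (dep : String × String × String) :
    aInner m st dep =
      ((pass1 (st.1, st.2.1) dep).1, (pass1 (st.1, st.2.1) dep).2,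
       st.2.2 ++ [((pass1 (st.1, st.2.1) dep).1.getD dep.1 0,
                   (pass1 (st.1, st.2.1) dep).1.getD dep.2.1 0,
                   m.getD dep.2.2 0)]) := rfl

-- one type_dep: A's interleaved fold equals pass1 followed by emission from the final dict
lemma inner_eq (m : PySem.Dict String Int) (deps : List (String × String × String)) :
    ∀ (d : PySem.Dict String Int) (ls : List String) (es : List (Int × Int × Int)),
      deps.foldl (aInner m) (d, ls, es) =
        ((deps.foldl pass1 (d, ls)).1, (deps.foldl pass1 (d, ls)).2,
         es ++ deps.map (fun dep =>
           ((deps.foldl pass1 (d, ls)).1.getD dep.1 0,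
            (deps.foldl pass1 (d, ls)).1.getD dep.2.1 0,
            m.getD dep.2.2 0))) := by
  induction deps with
  | nil => intro d ls es; simp
  | cons dep deps ih =>
    intro d ls es
    simp only [List.foldl_cons, List.map_cons, aInner_eq]
    rw [ih]
    obtain ⟨vs, hvs⟩ := pass1_get?_fst (d, ls) dep
    obtain ⟨ve, hve⟩ := pass1_get?_snd (d, ls) dep
    have hvs' := foldl_pass1_mono deps _ _ _ hvs
    have hve' := foldl_pass1_mono deps _ _ _ hve
    have h1 : (pass1 (d, ls) dep).1.getD dep.1 0 =
        (deps.foldl pass1 (pass1 (d, ls) dep)).1.getD dep.1 0 := by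
      rw [PySem.Dict.getD_eq_get?_getD, PySem.Dict.getD_eq_get?_getD, hvs, hvs']
    have h2 : (pass1 (d, ls) dep).1.getD dep.2.1 0 =
        (deps.foldl pass1 (pass1 (d, ls) dep)).1.getD dep.2.1 0 := by
      rw [PySem.Dict.getD_eq_get?_getD, PySem.Dict.getD_eq_get?_getD, hve, hve']
    simp [h1, h2]

-- mkIdx facts
lemma mkIdx_nil (b : Int) : mkIdx [] b = PySem.Dict.empty := rfl

lemma mkIdx_snoc (loc : List String) (n : String) (b : Int) :
    mkIdx (loc ++ [n]) b = (mkIdx loc b).insert n ((loc.length : Int) + b) := by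
  unfold mkIdx
  rw [PySem.List.enumerate_append]
  simp [PySem.List.enumerate, PySem.Dict.ofList, PySem.Dict.update, List.foldl_append]

lemma contains_mkIdx (loc : List String) (n : String) (b : Int) :
    (mkIdx loc b).contains n = loc.contains n := by
  induction loc using List.reverseRecOn with
  | nil => simp [mkIdx_nil]
  | append_singleton loc x ih =>
    rw [mkIdx_snoc, PySem.Dict.contains_insert, ih]
    by_cases hx : n = x <;> simp [hx]

lemma getD_mkIdx_shift (loc : List String) (n : String) (b : Int) (h : n ∈ loc) :
    (mkIdx loc b).getD n 0 = (mkIdx loc 0).getD n 0 + b := by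
  induction loc using List.reverseRecOn with
  | nil => simp at h
  | append_singleton loc x ih =>
    rw [mkIdx_snoc, mkIdx_snoc, PySem.Dict.getD_insert, PySem.Dict.getD_insert]
    by_cases hx : n = x
    · simp [hx]
    · have hmem : n ∈ loc := by
        rcases List.mem_append.mp h with h' | h'
        · exact h'
        · simp at h'; exact absurd h' hx
      simp [hx, ih hmem]

-- A's "register a name" step, on a state in mkIdx form
lemma addName_mkIdx (loc ls0 : List String) (n : String) :
    addName (mkIdx loc ((ls0.length : Int)), ls0 ++ loc) n =
      (mkIdx (PySem.Set.add loc n) ((ls0.length : Int)), ls0 ++ PySem.Set.add loc n) := by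
  unfold addName
  rw [contains_mkIdx]
  by_cases hc : loc.contains n = true
  · have hmem : n ∈ loc := by simpa using hc
    have hadd : PySem.Set.add loc n = loc := by simp [PySem.Set.add, hmem]
    rw [if_pos hc, hadd]
  · have hmem : n ∉ loc := by simpa using hc
    have hadd : PySem.Set.add loc n = loc ++ [n] := by simp [PySem.Set.add, hmem]
    rw [if_neg hc, hadd, mkIdx_snoc]
    have hl : ((ls0 ++ loc).length : Int) = (loc.length : Int) + (ls0.length : Int) := by
      push_cast [List.length_append]; ring
    rw [hl, List.append_assoc]

lemma pass1_mkIdx (loc ls0 : List String) (dep : String × String × String) :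
    pass1 (mkIdx loc ((ls0.length : Int)), ls0 ++ loc) dep =
      (mkIdx (PySem.Set.add (PySem.Set.add loc dep.1) dep.2.1) ((ls0.length : Int)),
       ls0 ++ PySem.Set.add (PySem.Set.add loc dep.1) dep.2.1) := by
  unfold pass1
  rw [addName_mkIdx, addName_mkIdx]

-- the name-registration fold, characterised: dict = mkIdx of the dedup list, labels appended
lemma foldl_pass1_char (deps : List (String × String × String)) :
    ∀ (loc ls0 : List String),
      deps.foldl pass1 (mkIdx loc ((ls0.length : Int)), ls0 ++ loc) =
        (mkIdx (deps.foldl (fun acc dep => PySem.Set.add (PySem.Set.add acc dep.1) dep.2.1) loc)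
          ((ls0.length : Int)),
         ls0 ++ deps.foldl (fun acc dep => PySem.Set.add (PySem.Set.add acc dep.1) dep.2.1) loc) := by
  induction deps with
  | nil => intro loc ls0; rfl
  | cons dep deps ih =>
    intro loc ls0
    simp only [List.foldl_cons]
    rw [pass1_mkIdx]
    exact ih _ _

lemma localLabels_eq_foldl (deps : List (String × String × String)) :
    localLabels deps =
      deps.foldl (fun acc dep => PySem.Set.add (PySem.Set.add acc dep.1) dep.2.1) [] := by
  unfold localLabels
  simp only [PySem.List.dedup, PySem.Set.ofList]
  rw [List.foldl_flatMap]
  rfl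

lemma foldl_pass1_empty (deps : List (String × String × String)) (ls0 : List String) :
    deps.foldl pass1 (PySem.Dict.empty, ls0) =
      (mkIdx (localLabels deps) ((ls0.length : Int)), ls0 ++ localLabels deps) := by
  have h := foldl_pass1_char deps [] ls0
  rw [mkIdx_nil, List.append_nil] at h
  rw [h, localLabels_eq_foldl]

-- every dependency endpoint is in the block's label list
lemma mem_localLabels_fst (deps : List (String × String × String))
    (dep : String × String × String) (h : dep ∈ deps) : dep.1 ∈ localLabels deps := by
  unfold localLabels
  rw [PySem.List.mem_dedup]
  exact List.mem_flatMap.mpr ⟨dep, h, by simp⟩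

lemma mem_localLabels_snd (deps : List (String × String × String))
    (dep : String × String × String) (h : dep ∈ deps) : dep.2.1 ∈ localLabels deps := by
  unfold localLabels
  rw [PySem.List.mem_dedup]
  exact List.mem_flatMap.mpr ⟨dep, h, by simp⟩

-- B's enumerate-built dict is mkIdx _ 0
lemma idx_eq_mkIdx (loc : List String) :
    PySem.Dict.ofList ((PySem.List.enumerate loc).map (fun p => (p.2, p.1))) = mkIdx loc 0 := by
  unfold mkIdx
  simp

-- one type_dep: A's step = append B's block, endpoints shifted by the current label count
lemma step_eq_block (m : PySem.Dict String Int) (ls : List String)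
    (es : List (Int × Int × Int)) (td : List (String × List (String × String × String))) :
    aStep m (ls, es) td =
      (ls ++ (localBlock m td).1,
       es ++ (localBlock m td).2.map
         (fun e => (e.1 + (ls.length : Int), e.2.1 + (ls.length : Int), e.2.2))) := by
  simp only [aStep, localBlock]
  rw [inner_eq, foldl_pass1_empty]
  simp only [idx_eq_mkIdx, List.map_map]
  refine Prod.ext rfl ?_
  show es ++ _ = es ++ _
  congr 1
  apply List.map_congr_left
  intro dep hdep
  simp only [Function.comp]
  rw [getD_mkIdx_shift _ _ _ (mem_localLabels_fst _ _ hdep),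
      getD_mkIdx_shift _ _ _ (mem_localLabels_snd _ _ hdep)]

-- stage-2 fold: A's outer fold equals B's combine fold with offset = label count
lemma outer_eq (m : PySem.Dict String Int)
    (tds : List (List (String × List (String × String × String)))) :
    ∀ (ls : List String) (es : List (Int × Int × Int)),
      tds.foldl (aStep m) (ls, es) =
        (((tds.map (localBlock m)).foldl combineB (ls, es, (ls.length : Int))).1,
         ((tds.map (localBlock m)).foldl combineB (ls, es, (ls.length : Int))).2.1) := by
  induction tds with
  | nil => intro ls es; rfl
  | cons td tds ih =>
    intro ls es
    simp only [List.foldl_cons, List.map_cons]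
    rw [step_eq_block]
    have hcomb : combineB (ls, es, (ls.length : Int)) (localBlock m td) =
        (ls ++ (localBlock m td).1,
         es ++ (localBlock m td).2.map
           (fun e => (e.1 + (ls.length : Int), e.2.1 + (ls.length : Int), e.2.2)),
         (((ls ++ (localBlock m td).1).length : Int))) := by
      have hl : (ls.length : Int) + ((localBlock m td).1.length : Int) =
          ((ls ++ (localBlock m td).1).length : Int) := by
        push_cast [List.length_append]; ring
      simp only [combineB]
      rw [hl]
    rw [hcomb]
    exact ih _ _

-- ===== VERDICT (by name: the statement is the Claim_ definition above) =====
theorem get_nodelabels_and_newedges_spec : Claim_equal_get_nodelabels_and_newedges := by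
  unfold Claim_equal_get_nodelabels_and_newedges
  intro types_deps m0 _ _
  unfold Spec_get_nodelabels_and_newedges
  unfold get_nodelabels_and_newedges get_nodelabels_and_newedges_alt
  simpa using outer_eq (PySem.Dict.ofList m0) types_deps [] []
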